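-- pv_equiv track=rewrite | github.com/heygoodgame/crossword-generator | src/crossword_generator/grid_pattern_generator.py | _check_min_word_length
-- ===== SOURCE A (Python) =====
-- def _check_min_word_length(
--     rows: int,
--     cols: int,
--     black: set[tuple[int, int]],
--     min_len: int,
-- ) -> bool:
--     """Return True if all word slots are >= min_len letters."""
--     # Check across
--     for r in range(rows):
--         length = 0
--         for c in range(cols):
--             if (r, c) in black:
--                 if 0 < length < min_len:
--                     return False
--                 length = 0
--             else:
--                 length += 1
--         if 0 < length < min_len:
--             return False
--
--     # Check down
--     for c in range(cols):
--         length = 0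
--         for r in range(rows):
--             if (r, c) in black:
--                 if 0 < length < min_len:
--                     return False
--                 length = 0
--             else:
--                 length += 1
--         if 0 < length < min_len:
--             return False
--
--     return True
-- ===== SOURCE B (Python) =====
-- def _check_min_word_length(
--     rows: int,
--     cols: int,
--     black: set[tuple[int, int]],
--     min_len: int,
-- ) -> bool:
--     """Return True if all word slots are >= min_len letters."""
--
--     def line_ok(cells):
--         # Render the line ('#' = black, '.' = white) and split it into word slots.
--         segments = ''.join('#' if b else '.' for b in cells).split('#')
--         return all(len(seg) == 0 or len(seg) >= min_len for seg in segments)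
--
--     return (all(line_ok([(r, c) in black for c in range(cols)]) for r in range(rows))
--             and all(line_ok([(r, c) in black for r in range(rows)]) for c in range(cols)))
-- ===== Notes on version B (the rewrite author's own statement) =====
-- stated objective: idiomatic
-- what changed: B materializes each row/column as a '#'/'.' string, splits it on '#' into word-slot segments and checks every segment's length with all(), instead of threading a running counter that resets on black cells with early returns.
import Mathlib
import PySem

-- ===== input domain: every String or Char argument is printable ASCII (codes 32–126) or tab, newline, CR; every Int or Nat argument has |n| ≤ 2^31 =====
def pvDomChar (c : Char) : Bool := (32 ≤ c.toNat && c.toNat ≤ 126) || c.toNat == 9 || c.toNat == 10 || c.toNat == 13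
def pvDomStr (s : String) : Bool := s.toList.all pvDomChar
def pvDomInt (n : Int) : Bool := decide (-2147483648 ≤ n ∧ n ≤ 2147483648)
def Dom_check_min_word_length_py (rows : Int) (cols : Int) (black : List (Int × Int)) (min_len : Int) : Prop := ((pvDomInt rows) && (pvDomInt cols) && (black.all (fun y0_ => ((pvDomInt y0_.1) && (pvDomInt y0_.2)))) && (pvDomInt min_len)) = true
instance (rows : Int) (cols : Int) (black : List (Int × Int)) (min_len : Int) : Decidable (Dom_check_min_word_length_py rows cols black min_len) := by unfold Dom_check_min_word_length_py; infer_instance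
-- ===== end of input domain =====

-- B renders each line as a '#'/'.' string and splits it into word slots, then checks the slot
-- lengths; same value as A's running-counter scan (objective: idiomatic, no speed claim).

-- ===== PORT A =====
-- inner loop of A over one line: `length` is the running white-run counter, early `return False`
-- is the value `false`
def pvScanA (mem : Int → Bool) (m : Int) : List Int → Int → Bool
  | [], len => !(decide (0 < len ∧ len < m))
  | i :: t, len =>
      if mem i then
        (if 0 < len ∧ len < m then false else pvScanA mem m t 0)
      else pvScanA mem m t (len + 1)

def check_min_word_length_py (rows : Int) (cols : Int) (black : List (Int × Int)) (min_len : Int) : Bool :=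
  ((PySem.List.pyRange 0 rows 1).all fun r =>
      pvScanA (fun c => black.contains (r, c)) min_len (PySem.List.pyRange 0 cols 1) 0)
  && ((PySem.List.pyRange 0 cols 1).all fun c =>
      pvScanA (fun r => black.contains (r, c)) min_len (PySem.List.pyRange 0 rows 1) 0)

-- ===== PORT B =====
-- line_ok: join the line into a '#'/'.' string, split on '#', check every segment's length
def pvLineOkB (cells : List Bool) (m : Int) : Bool :=
  (PySem.Chars.splitOn
      (PySem.Chars.join [] (cells.map (fun b => if b then ['#'] else ['.'])))
      ['#']).all
    (fun seg => (seg.length == 0) || decide (m ≤ (seg.length : Int)))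

def check_min_word_length_py_alt (rows : Int) (cols : Int) (black : List (Int × Int)) (min_len : Int) : Bool :=
  ((PySem.List.pyRange 0 rows 1).all fun r =>
      pvLineOkB ((PySem.List.pyRange 0 cols 1).map (fun c => black.contains (r, c))) min_len)
  && ((PySem.List.pyRange 0 cols 1).all fun c =>
      pvLineOkB ((PySem.List.pyRange 0 rows 1).map (fun r => black.contains (r, c))) min_len)

-- ===== PRECONDITION & SPEC =====
def Spec_check_min_word_length_py (rows : Int) (cols : Int) (black : List (Int × Int)) (min_len : Int) (out : Bool) : Prop := out = check_min_word_length_py_alt rows cols black min_len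
instance (rows : Int) (cols : Int) (black : List (Int × Int)) (min_len : Int) (out : Bool) : Decidable (Spec_check_min_word_length_py rows cols black min_len out) := by unfold Spec_check_min_word_length_py; infer_instance

-- ===== CLAIM (what is proved, stated in full; the proofs are below) =====
def Claim_equal_check_min_word_length_py : Prop := ∀ (rows : Int) (cols : Int) (black : List (Int × Int)) (min_len : Int), Dom_check_min_word_length_py rows cols black min_len → Spec_check_min_word_length_py rows cols black min_len (check_min_word_length_py rows cols black min_len)

-- ===== LEMMAS AND PROOFS =====

-- the list of white-run lengths of a line (always nonempty)
def pvRuns : List Bool → List Nat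
  | [] => [0]
  | true :: t => 0 :: pvRuns t
  | false :: t =>
      match pvRuns t with
      | [] => [1]
      | h :: t' => (h + 1) :: t'

theorem pvRuns_ne_nil (cells : List Bool) : pvRuns cells ≠ [] := by
  match cells with
  | [] => simp [pvRuns]
  | true :: t => simp [pvRuns]
  | false :: t =>
      have := pvRuns_ne_nil t
      cases h : pvRuns t with
      | nil => simp [pvRuns, h]
      | cons a l => simp [pvRuns, h]

theorem pvRuns_eq_cons (cells : List Bool) :
    pvRuns cells = (pvRuns cells).headD 0 :: (pvRuns cells).tail := by
  cases h : pvRuns cells with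
  | nil => exact absurd h (pvRuns_ne_nil cells)
  | cons a l => simp

-- pvScanA only looks at `mem i`: rewrite it over the bool line
def pvScanCells (m : Int) : List Bool → Int → Bool
  | [], len => !(decide (0 < len ∧ len < m))
  | b :: t, len =>
      if b then (if 0 < len ∧ len < m then false else pvScanCells m t 0)
      else pvScanCells m t (len + 1)

theorem pvScanA_eq_cells (mem : Int → Bool) (m : Int) (idxs : List Int) (len : Int) :
    pvScanA mem m idxs len = pvScanCells m (idxs.map mem) len := by
  induction idxs generalizing len with
  | nil => rfl
  | cons i t ih => simp only [pvScanA, List.map, pvScanCells, ih]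

-- A's scan as "every run is ok", with the accumulator folded into the first run
theorem pvScanCells_eq_runs (m : Int) (cells : List Bool) (len : Int) :
    pvScanCells m cells len =
      ((!(decide (0 < len + ((pvRuns cells).headD 0 : Int) ∧ len + ((pvRuns cells).headD 0 : Int) < m)))
        && ((pvRuns cells).tail).all (fun x => !(decide (0 < (x : Int) ∧ (x : Int) < m)))) := by
  induction cells generalizing len with
  | nil => simp [pvScanCells, pvRuns]
  | cons b t ih =>
      cases b with
      | true =>
          rw [show pvScanCells m (true :: t) len
                = (if 0 < len ∧ len < m then false else pvScanCells m t 0) from rfl]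
          rw [show pvRuns (true :: t) = 0 :: pvRuns t from rfl]
          simp only [List.headD, List.tail]
          by_cases h : 0 < len ∧ len < m
          · simp [h]
          · rw [if_neg h, ih 0]
            conv_rhs => rw [pvRuns_eq_cons t]
            simp only [List.all_cons, zero_add, Nat.cast_zero, add_zero]
            rw [decide_eq_false h]
            simp
      | false =>
          rw [show pvScanCells m (false :: t) len = pvScanCells m t (len + 1) from rfl, ih (len + 1)]
          rw [show pvRuns (false :: t) = (match pvRuns t with | [] => [1] | h :: t' => (h+1) :: t') from rfl]
          cases h : pvRuns t with
          | nil => exact absurd h (pvRuns_ne_nil t)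
          | cons a l =>
              simp only [List.headD, List.tail]
              have e : decide (0 < len + 1 + (a : Int) ∧ len + 1 + (a : Int) < m)
                  = decide (0 < len + ((a + 1 : Nat) : Int) ∧ len + ((a + 1 : Nat) : Int) < m) := by
                apply decide_eq_decide.mpr
                push_cast
                omega
              exact congrArg
                (fun b => (!b && l.all fun x => !decide (0 < (x : Int) ∧ (x : Int) < m))) e

-- splitOn over the rendered line, lengths only
def pvToChar (b : Bool) : Char := if b then '#' else '.'

theorem pvGo_lengths (cells : List Bool) (fuel : Nat) (cur : List Char) (acc : List (List Char))
    (hf : cells.length ≤ fuel) :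
    (PySem.Chars.splitOn.go ['#'] fuel (cells.map pvToChar) cur acc).map List.length
      = (acc.map List.length).reverse
        ++ (cur.length + (pvRuns cells).headD 0) :: (pvRuns cells).tail := by
  induction cells generalizing fuel cur acc with
  | nil =>
      cases fuel with
      | zero => simp [PySem.Chars.splitOn.go, pvRuns]
      | succ f => simp [PySem.Chars.splitOn.go, pvRuns]
  | cons b t ih =>
      cases fuel with
      | zero => simp at hf
      | succ f =>
          have hf' : t.length ≤ f := by simp at hf; omega
          cases b with
          | true =>
              rw [show (true :: t).map pvToChar = '#' :: t.map pvToChar from rfl]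
              rw [PySem.Chars.splitOn.go.eq_def]
              simp only [List.isPrefixOf, beq_self_eq_true, Bool.true_and, if_pos,
                List.drop_succ_cons, List.drop_zero, List.length]
              rw [ih f [] (cur.reverse :: acc) hf']
              rw [show pvRuns (true :: t) = 0 :: pvRuns t from rfl]
              rw [pvRuns_eq_cons t]
              simp
          | false =>
              rw [show (false :: t).map pvToChar = '.' :: t.map pvToChar from rfl]
              rw [PySem.Chars.splitOn.go.eq_def]
              have : (['#'].isPrefixOf ('.' :: t.map pvToChar)) = false := by
                simp [List.isPrefixOf]
              simp only [this, Bool.false_eq_true, if_false]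
              rw [ih f ('.' :: cur) acc hf']
              rw [show pvRuns (false :: t) = (match pvRuns t with | [] => [1] | h :: t' => (h+1) :: t') from rfl]
              cases h : pvRuns t with
              | nil => exact absurd h (pvRuns_ne_nil t)
              | cons a l => simp; omega

theorem pvLineOkB_eq_runs (cells : List Bool) (m : Int) :
    pvLineOkB cells m
      = (pvRuns cells).all (fun x => (x == 0) || decide (m ≤ (x : Int))) := by
  unfold pvLineOkB
  have hjoin : PySem.Chars.join [] (cells.map (fun b => if b then ['#'] else ['.']))
      = cells.map pvToChar := by
    have : cells.map (fun b => if b then ['#'] else ['.'])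
        = (cells.map pvToChar).map (fun c => [c]) := by
      rw [List.map_map]
      apply List.map_congr_left
      intro b _
      cases b <;> rfl
    rw [this, PySem.Chars.join_nil_singletons]
  rw [hjoin]
  unfold PySem.Chars.splitOn
  have := pvGo_lengths cells ((cells.map pvToChar).length + 1) [] [] (by simp)
  have hall : ∀ (L : List (List Char)) (p : Nat → Bool),
      L.all (fun seg => p seg.length) = (L.map List.length).all p := by
    intro L p; induction L with
    | nil => rfl
    | cons a l ih => simp [ih]
  rw [hall _ (fun x => (x == 0) || decide (m ≤ (x : Int)))]
  rw [this]
  simp only [List.map_nil, List.reverse_nil, List.nil_append, List.length_nil, Nat.zero_add]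
  rw [← pvRuns_eq_cons cells]

theorem pvOk_eq (m : Int) (x : Nat) :
    (!(decide (0 < (x : Int) ∧ (x : Int) < m))) = ((x == 0) || decide (m ≤ (x : Int))) := by
  rcases Nat.eq_zero_or_pos x with h | h
  · subst h; simp
  · have hx : (0 : Int) < x := by exact_mod_cast h
    have hne : (x == 0) = false := by simp; omega
    rw [hne, Bool.false_or]
    by_cases hm : m ≤ (x : Int)
    · rw [decide_eq_true hm, decide_eq_false (by omega : ¬(0 < (x : Int) ∧ (x : Int) < m))]
      rfl
    · rw [decide_eq_false hm, decide_eq_true (by omega : (0 < (x : Int) ∧ (x : Int) < m))]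
      rfl

theorem pvLine_eq (mem : Int → Bool) (m : Int) (idxs : List Int) :
    pvScanA mem m idxs 0 = pvLineOkB (idxs.map mem) m := by
  rw [pvScanA_eq_cells, pvScanCells_eq_runs, pvLineOkB_eq_runs]
  conv_rhs => rw [pvRuns_eq_cons (idxs.map mem)]
  rw [List.all_cons]
  congr 1
  · rw [← pvOk_eq]
    congr 1
    exact decide_eq_decide.mpr (by omega)
  · exact List.all_congr rfl (fun x => pvOk_eq m x)

-- ===== VERDICT (by name: the statement is the Claim_ definition above) =====
theorem check_min_word_length_py_spec : Claim_equal_check_min_word_length_py := by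
  intro rows cols black min_len _
  unfold Spec_check_min_word_length_py
  unfold check_min_word_length_py check_min_word_length_py_alt
  congr 1
  · exact List.all_congr rfl (fun r => pvLine_eq _ _ _)
  · exact List.all_congr rfl (fun c => pvLine_eq _ _ _)
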